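-- pv_equiv track=rewrite | github.com/dp304/enterscumm | tools/unpack.py | read_room_disks_and_offsets
-- ===== SOURCE A (Python) =====
-- def get_c64_disk_offset(track, sector):
--     sectors_per_track = [21, 19, 18, 17]
--     track_count =       [17,  7,  6,  4]
--
--     track = track - 1   # Track number on C64 disk starts at 1
--
--     group = 0
--     while track > 0:
--         n = min(track, track_count[group])
--         sector += n * sectors_per_track[group]
--         track -= n
--         group += 1
--
--     return 256 * sector
--
-- def read_room_disks_and_offsets(disk1, start, count):
--     room_disks = []
--     for pos in range(start, start+count):
--         disk_no = 0
--         if disk1[pos] == 0x31: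
--             disk_no = 1
--         elif disk1[pos] == 0x32:
--             disk_no = 2
--         room_disks.append(disk_no)
--     start += count
--
--     room_offsets = []
--     for pos in range(start, start+2*count, 2):
--         room_offsets.append(get_c64_disk_offset(int(disk1[pos+1]), int(disk1[pos])))
--     start += 2*count
--
--     return (room_disks, room_offsets, start)
-- ===== SOURCE B (Python) =====
-- # Replaces the group-by-group while loop with a precomputed prefix-sum table of
-- # sector bases per track, and builds both result lists with comprehensions.
--
-- _TRACK_BASE = []
-- _total = 0
-- for _spt, _tc in zip([21, 19, 18, 17], [17, 7, 6, 4]):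
--     for _ in range(_tc):
--         _TRACK_BASE.append(_total)
--         _total += _spt
-- _TRACK_BASE.append(_total)  # base for track 35 (the last track the loop accepts)
--
--
-- def _offset(track, sector):
--     base = 0 if track < 1 else _TRACK_BASE[track - 1]
--     return 256 * (sector + base)
--
--
-- def read_room_disks_and_offsets(disk1, start, count):
--     room_disks = [1 if disk1[start + i] == 0x31 else 2 if disk1[start + i] == 0x32 else 0
--                   for i in range(count)]
--     p = start + count
--     room_offsets = [_offset(disk1[p + 2 * i + 1], disk1[p + 2 * i]) for i in range(count)]
--     return (room_disks, room_offsets, start + 3 * count)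
-- ===== Notes on version B (the rewrite author's own statement) =====
-- stated objective: simpler
-- what changed: Replaces the group-by-group while loop of get_c64_disk_offset with a single lookup in a precomputed prefix-sum table of sector bases per track, and builds both result lists with comprehensions over range(count) instead of append loops with a mutated start.
import Mathlib
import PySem

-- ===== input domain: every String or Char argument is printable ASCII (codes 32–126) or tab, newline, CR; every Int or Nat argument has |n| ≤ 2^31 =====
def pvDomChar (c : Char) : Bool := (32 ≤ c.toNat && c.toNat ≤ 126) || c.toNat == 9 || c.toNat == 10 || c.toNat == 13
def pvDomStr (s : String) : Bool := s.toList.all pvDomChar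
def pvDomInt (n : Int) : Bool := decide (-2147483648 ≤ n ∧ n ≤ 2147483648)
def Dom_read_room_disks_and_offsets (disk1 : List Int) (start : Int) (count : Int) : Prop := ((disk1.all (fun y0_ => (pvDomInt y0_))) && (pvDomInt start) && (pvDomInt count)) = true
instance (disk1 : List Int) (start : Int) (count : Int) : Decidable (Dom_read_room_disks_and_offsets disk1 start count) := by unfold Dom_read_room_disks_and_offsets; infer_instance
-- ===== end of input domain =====

-- B replaces A's group-by-group while loop with a precomputed prefix-sum table of sector
-- bases per track and builds both result lists by comprehensions (simpler; same cost).

-- ===== PORT A =====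

-- the while loop of get_c64_disk_offset: group advances through the two parallel lists;
-- indexing past their end (track left over after group 3) is IndexError = none
def pvLoopA (track sector : Int) (spt tc : List Int) : Option Int :=
  if track > 0 then
    match spt, tc with
    | s :: spt', c :: tc' => pvLoopA (track - min track c) (sector + min track c * s) spt' tc'
    | _, _ => none
  else some (256 * sector)

def get_c64_disk_offset (track sector : Int) : Option Int :=
  pvLoopA (track - 1) sector [21, 19, 18, 17] [17, 7, 6, 4]

-- one 'room_x.append(...)' step of A's loops; f pos = the element computed from disk1[...]
def pvStepOpt (f : Int → Option Int) (acc : Option (List Int)) (pos : Int) : Option (List Int) :=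
  match acc, f pos with
  | some l, some v => some (l ++ [v])
  | _, _ => none

def read_room_disks_and_offsets (disk1 : List Int) (start : Int) (count : Int) : List Int × List Int × Int :=
  let room_disks := (PySem.List.pyRange start (start + count) 1).foldl
    (pvStepOpt (fun pos => (PySem.List.pyGet? disk1 pos).map
      (fun v => if v = 49 then 1 else if v = 50 then 2 else 0))) (some [])
  let start1 := start + count
  let room_offsets := (PySem.List.pyRange start1 (start1 + 2 * count) 2).foldl
    (pvStepOpt (fun pos =>
      match PySem.List.pyGet? disk1 (pos + 1), PySem.List.pyGet? disk1 pos with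
      | some t, some s => get_c64_disk_offset t s
      | _, _ => none)) (some [])
  match room_disks, room_offsets with
  | some d, some o => (d, o, start1 + 2 * count)
  | _, _ => ([], [], 0)   -- unreachable under Pre_

-- ===== PORT B =====

-- _TRACK_BASE: sectors preceding track i+1, for tracks 1..35
def pvTrackBase : List Int :=
  [0, 21, 42, 63, 84, 105, 126, 147, 168, 189, 210, 231, 252, 273, 294, 315, 336,
   357, 376, 395, 414, 433, 452, 471, 490, 508, 526, 544, 562, 580, 598, 615, 632, 649, 666]

def pvOffsetAlt (track sector : Int) : Option Int :=
  (if track < 1 then some 0 else PySem.List.pyGet? pvTrackBase (track - 1)).map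
    (fun base => 256 * (sector + base))

def read_room_disks_and_offsets_alt (disk1 : List Int) (start : Int) (count : Int) : List Int × List Int × Int :=
  let room_disks := (PySem.List.pyRange 0 count 1).mapM (fun i =>
    (PySem.List.pyGet? disk1 (start + i)).map
      (fun v => if v = 49 then 1 else if v = 50 then 2 else 0))
  let p := start + count
  let room_offsets := (PySem.List.pyRange 0 count 1).mapM (fun i =>
    match PySem.List.pyGet? disk1 (p + 2 * i + 1), PySem.List.pyGet? disk1 (p + 2 * i) with
    | some t, some s => pvOffsetAlt t s
    | _, _ => none)
  match room_disks, room_offsets with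
  | some d, some o => (d, o, start + 3 * count)
  | _, _ => ([], [], 0)   -- unreachable under Pre_

-- ===== PRECONDITION & SPEC =====
-- Pre_ = exactly the inputs where A returns: every accessed index is a valid Python index
-- of disk1, and every track byte is ≤ 35 (a larger track makes A's while loop run off the
-- end of track_count, an IndexError).
def Pre_read_room_disks_and_offsets (disk1 : List Int) (start : Int) (count : Int) : Prop :=
  (count ≤ 0 ∨ (-(disk1.length : Int) ≤ start ∧ start + 3 * count ≤ disk1.length)) ∧
  (∀ k : Nat, k < count.toNat → (PySem.List.pyGet? disk1 (start + count + 2 * (k : Int) + 1)).getD 0 ≤ 35)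
instance (disk1 : List Int) (start : Int) (count : Int) : Decidable (Pre_read_room_disks_and_offsets disk1 start count) := by unfold Pre_read_room_disks_and_offsets; infer_instance

def pvWitness_read_room_disks_and_offsets : List Int × Int × Int := ([49, 2, 3], 0, 1)

def Spec_read_room_disks_and_offsets (disk1 : List Int) (start : Int) (count : Int) (out : List Int × List Int × Int) : Prop := out = read_room_disks_and_offsets_alt disk1 start count
instance (disk1 : List Int) (start : Int) (count : Int) (out : List Int × List Int × Int) : Decidable (Spec_read_room_disks_and_offsets disk1 start count out) := by unfold Spec_read_room_disks_and_offsets; infer_instance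

-- ===== CLAIM (what is proved, stated in full; the proofs are below) =====
def Claim_equal_read_room_disks_and_offsets : Prop := ∀ (disk1 : List Int) (start : Int) (count : Int), Dom_read_room_disks_and_offsets disk1 start count → Pre_read_room_disks_and_offsets disk1 start count → Spec_read_room_disks_and_offsets disk1 start count (read_room_disks_and_offsets disk1 start count)

-- ===== LEMMAS AND PROOFS =====

-- the value B computes per offset position (proof-side description)
def pvBaseVal (t : Int) : Int := if t < 1 then 0 else (PySem.List.pyGet? pvTrackBase (t - 1)).getD 0

theorem pvFoldOpt_eq_map (l : List Int) (f : Int → Option Int) (g : Int → Int)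
    (h : ∀ x ∈ l, f x = some (g x)) (acc : List Int) :
    l.foldl (pvStepOpt f) (some acc) = some (acc ++ l.map g) := by
  induction l generalizing acc with
  | nil => simp
  | cons x xs ih =>
    simp only [List.foldl_cons, pvStepOpt, h x (by simp)]
    rw [ih (fun y hy => h y (by simp [hy]))]
    simp

theorem pvMapM_eq_map (l : List Int) (f : Int → Option Int) (g : Int → Int)
    (h : ∀ x ∈ l, f x = some (g x)) :
    l.mapM f = some (l.map g) := by
  induction l with
  | nil => simp
  | cons x xs ih =>
    rw [List.mapM_cons, h x (by simp), ih (fun y hy => h y (by simp [hy]))]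
    simp

theorem pvOffA_eq (t s : Int) (ht : t ≤ 35) :
    get_c64_disk_offset t s = some (256 * (s + pvBaseVal t)) := by
  by_cases h1 : t < 1
  · have hng : ¬ (t - 1 > 0) := by omega
    rw [get_c64_disk_offset, pvLoopA, if_neg hng]
    simp [pvBaseVal, h1]
  · have h2 : 1 ≤ t := by omega
    interval_cases t <;>
      · simp [get_c64_disk_offset, pvLoopA, pvBaseVal, pvTrackBase,
              PySem.List.pyGet?, PySem.List.pyIdx?]
        try omega

theorem pvOffB_eq (t s : Int) (ht : t ≤ 35) :
    pvOffsetAlt t s = some (256 * (s + pvBaseVal t)) := by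
  by_cases h1 : t < 1
  · simp [pvOffsetAlt, pvBaseVal, h1]
  · have h0 : (0 : Int) ≤ t - 1 := by omega
    have hlt : t - 1 < (pvTrackBase.length : Int) := by simp [pvTrackBase]; omega
    simp [pvOffsetAlt, pvBaseVal, h1, PySem.List.pyGet?_eq_some_getElem pvTrackBase h0 hlt]

theorem read_room_disks_and_offsets_spec : Claim_equal_read_room_disks_and_offsets := by
  intro disk1 start count hdom hpre
  obtain ⟨hidx, htrk⟩ := hpre
  unfold Spec_read_room_disks_and_offsets
  unfold read_room_disks_and_offsets read_room_disks_and_offsets_alt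
  set dno : Int → Int := fun v => if v = 49 then 1 else if v = 50 then 2 else 0 with hdno
  set gD : Int → Int := fun pos => dno ((PySem.List.pyGet? disk1 pos).getD 0) with hgD
  set gO : Int → Int := fun pos =>
    256 * ((PySem.List.pyGet? disk1 pos).getD 0 +
      pvBaseVal ((PySem.List.pyGet? disk1 (pos + 1)).getD 0)) with hgO
  have hsome : ∀ i : Int, start ≤ i → i < start + 3 * count →
      PySem.List.pyGet? disk1 i = some ((PySem.List.pyGet? disk1 i).getD 0) := by
    intro i h1 h2
    have hb : -(disk1.length : Int) ≤ start ∧ start + 3 * count ≤ disk1.length := by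
      rcases hidx with h | h
      · omega
      · exact h
    have hnn : PySem.List.pyGet? disk1 i ≠ none := by
      rw [Ne, PySem.List.pyGet?_eq_none_iff]
      intro hcon
      exact hcon ⟨by omega, by omega⟩
    rcases Option.ne_none_iff_exists'.mp hnn with ⟨v, hv⟩
    simp [hv]
  -- first loop / comprehension
  have hA1 : (PySem.List.pyRange start (start + count) 1).foldl
      (pvStepOpt (fun pos => (PySem.List.pyGet? disk1 pos).map dno)) (some []) =
      some ((PySem.List.pyRange start (start + count) 1).map gD) := by
    rw [pvFoldOpt_eq_map _ _ gD ?_ []]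
    · simp
    · intro x hx
      rw [PySem.List.mem_pyRange_one] at hx
      rw [hsome x hx.1 (by omega)]
      rfl
  have hB1 : (PySem.List.pyRange 0 count 1).mapM
      (fun i => (PySem.List.pyGet? disk1 (start + i)).map dno) =
      some ((PySem.List.pyRange 0 count 1).map (fun i => gD (start + i))) := by
    apply pvMapM_eq_map
    intro x hx
    rw [PySem.List.mem_pyRange_one] at hx
    rw [hsome (start + x) (by omega) (by omega)]
    rfl
  have hmap1 : (PySem.List.pyRange start (start + count) 1).map gD =
      (PySem.List.pyRange 0 count 1).map (fun i => gD (start + i)) := by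
    rw [PySem.List.pyRange_one, PySem.List.pyRange_one]
    simp [List.map_map, Function.comp]
  -- second loop / comprehension
  have hboth : ∀ j : Int, 0 ≤ j → j < count →
      (match PySem.List.pyGet? disk1 (start + count + 2 * j + 1),
             PySem.List.pyGet? disk1 (start + count + 2 * j) with
       | some t, some s => get_c64_disk_offset t s
       | _, _ => none) = some (gO (start + count + 2 * j)) ∧
      (match PySem.List.pyGet? disk1 (start + count + 2 * j + 1),
             PySem.List.pyGet? disk1 (start + count + 2 * j) with
       | some t, some s => pvOffsetAlt t s
       | _, _ => none) = some (gO (start + count + 2 * j)) := by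
    intro j hj0 hjc
    have h1 := hsome (start + count + 2 * j) (by omega) (by omega)
    have h2 := hsome (start + count + 2 * j + 1) (by omega) (by omega)
    have ht : (PySem.List.pyGet? disk1 (start + count + 2 * j + 1)).getD 0 ≤ 35 := by
      have := htrk j.toNat (by omega)
      have hcast : ((j.toNat : Nat) : Int) = j := by omega
      rwa [hcast] at this
    rw [h1, h2]
    exact ⟨pvOffA_eq _ _ ht, pvOffB_eq _ _ ht⟩
  have hrange2 : PySem.List.pyRange (start + count) (start + count + 2 * count) 2 =
      (List.range count.toNat).map (fun k : Nat => start + count + 2 * (k : Int)) := by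
    rw [PySem.List.pyRange_of_pos _ _ (by norm_num : (0:Int) < 2)]
    have h : (if start + count < start + count + 2 * count
        then ((start + count + 2 * count - (start + count) + 2 - 1) / 2).toNat else 0)
        = count.toNat := by split_ifs <;> omega
    rw [h]
  have hA2 : (PySem.List.pyRange (start + count) (start + count + 2 * count) 2).foldl
      (pvStepOpt (fun pos =>
        match PySem.List.pyGet? disk1 (pos + 1), PySem.List.pyGet? disk1 pos with
        | some t, some s => get_c64_disk_offset t s
        | _, _ => none)) (some []) =
      some (((List.range count.toNat).map (fun k : Nat => start + count + 2 * (k : Int))).map gO) := by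
    rw [hrange2, pvFoldOpt_eq_map _ _ gO ?_ []]
    · simp
    · intro x hx
      rcases List.mem_map.mp hx with ⟨k, hk, rfl⟩
      have hk' : k < count.toNat := List.mem_range.mp hk
      exact (hboth (k : Int) (by omega) (by omega)).1
  have hB2 : (PySem.List.pyRange 0 count 1).mapM (fun i =>
      match PySem.List.pyGet? disk1 (start + count + 2 * i + 1),
            PySem.List.pyGet? disk1 (start + count + 2 * i) with
      | some t, some s => pvOffsetAlt t s
      | _, _ => none) =
      some ((PySem.List.pyRange 0 count 1).map (fun i => gO (start + count + 2 * i))) := by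
    apply pvMapM_eq_map
    intro x hx
    rw [PySem.List.mem_pyRange_one] at hx
    exact (hboth x hx.1 hx.2).2
  have hmap2 : ((List.range count.toNat).map (fun k : Nat => start + count + 2 * (k : Int))).map gO =
      (PySem.List.pyRange 0 count 1).map (fun i => gO (start + count + 2 * i)) := by
    rw [PySem.List.pyRange_one]
    simp [List.map_map, Function.comp]
  simp only [hA1, hB1, hA2, hB2, hmap1, hmap2]
  have h3 : start + count + 2 * count = start + 3 * count := by ring
  rw [h3]
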